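-- pv_equiv track=rewrite | github.com/IlyaSulli/GoCP | data/Semantic Benchmark/Python/Stand alone clones/Clone304.py | micro_world
-- ===== SOURCE A (Python) =====
-- def micro_world(bacteria, k) :
-- 	bacteria = sorted(bacteria, reverse = True)
-- 	i = 0
-- 	result = 0
-- 	while i < len(bacteria) :
-- 		bacterium_size = bacteria [i]
-- 		bigger_bacterium_exists = False
-- 		while i + 1 < len(bacteria) :
-- 			difference = bacterium_size - bacteria [i + 1]
-- 			if difference > k :
-- 				break
-- 			if difference == 0 and not bigger_bacterium_exists :
-- 				break
-- 			bacterium_size = bacteria [i + 1]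
-- 			i += 1
-- 			bigger_bacterium_exists = True
-- 		result += 1
-- 		i += 1
-- 	return result
-- ===== SOURCE B (Python) =====
-- def micro_world(bacteria, k):
--     # A bacterium survives iff no strictly larger bacterium within k exists.
--     return sum(1 for x in bacteria
--                if not any(x < y <= x + k for y in bacteria))
-- ===== Notes on version B (the rewrite author's own statement) =====
-- stated objective: simpler
-- what changed: A sorts descending and runs a stateful chain-merge sweep with a flag; B drops the sort entirely and directly counts the bacteria x for which no strictly larger bacterium y with y <= x+k exists.
import Mathlib
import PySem

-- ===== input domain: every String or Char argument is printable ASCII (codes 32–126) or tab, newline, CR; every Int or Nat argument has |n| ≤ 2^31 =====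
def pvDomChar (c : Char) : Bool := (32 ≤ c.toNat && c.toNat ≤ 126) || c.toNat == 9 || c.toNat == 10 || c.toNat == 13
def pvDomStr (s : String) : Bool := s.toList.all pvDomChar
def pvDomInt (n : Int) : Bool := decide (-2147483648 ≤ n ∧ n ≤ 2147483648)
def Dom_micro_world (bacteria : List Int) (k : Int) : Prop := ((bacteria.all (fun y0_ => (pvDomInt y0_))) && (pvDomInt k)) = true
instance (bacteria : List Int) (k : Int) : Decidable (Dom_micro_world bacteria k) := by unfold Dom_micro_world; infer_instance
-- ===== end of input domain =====

-- B replaces A's sort-plus-chain-merge sweep by a direct per-element survival count (simpler; no sort, no flag state).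


-- ===== PORT A =====
-- inner while-loop; the cursor i is carried as the suffix bacteria[i+1:] of the sorted
-- list, the loop state (bacterium_size, bigger_bacterium_exists) stays explicit;
-- returns the suffix after the final i (the guard 'i + 1 < len' is 'rest ≠ []').
def pvInnerA (k : Int) (size : Int) (flag : Bool) (rest : List Int) : List Int :=
  match rest with
  | [] => []
  | x :: rest' =>
    let d := size - x
    if d > k then x :: rest'
    else if d = 0 ∧ flag = false then x :: rest'
    else pvInnerA k x true rest'

-- the inner loop only drops elements from the front (cited by pvOuterA's decreasing_by)
theorem pvInnerA_len_le (k : Int) (size : Int) (flag : Bool) (rest : List Int) :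
    (pvInnerA k size flag rest).length ≤ rest.length := by
  induction rest generalizing size flag with
  | nil => simp [pvInnerA]
  | cons x rest' ih =>
    rw [pvInnerA]
    split
    · simp
    · split
      · simp
      · exact Nat.le_succ_of_le (ih x true)

-- outer while-loop; state (result, remaining suffix bacteria[i:])
def pvOuterA (k : Int) (result : Int) (rest : List Int) : Int :=
  match rest with
  | [] => result
  | x :: rest' => pvOuterA k (result + 1) (pvInnerA k x false rest')
termination_by rest.length
decreasing_by exact Nat.lt_succ_of_le (pvInnerA_len_le k x false rest')

def micro_world (bacteria : List Int) (k : Int) : Int :=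
  pvOuterA k 0 (PySem.List.sorted bacteria (fun x => x) true)

-- ===== PORT B =====
def micro_world_alt (bacteria : List Int) (k : Int) : Int :=
  (bacteria.countP
    (fun x => !(bacteria.any (fun y => decide (x < y) && decide (y ≤ x + k)))) : Nat)

-- ===== PRECONDITION & SPEC =====
def Spec_micro_world (bacteria : List Int) (k : Int) (out : Int) : Prop := out = micro_world_alt bacteria k
instance (bacteria : List Int) (k : Int) (out : Int) : Decidable (Spec_micro_world bacteria k out) := by unfold Spec_micro_world; infer_instance

-- ===== CLAIM (what is proved, stated in full; the proofs are below) =====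
def Claim_equal_micro_world : Prop := ∀ (bacteria : List Int) (k : Int), Dom_micro_world bacteria k → Spec_micro_world bacteria k (micro_world bacteria k)

-- ===== LEMMAS AND PROOFS =====

-- the survival predicate B counts: no strictly larger bacterium within k
def pvSurv (l : List Int) (k x : Int) : Bool :=
  !(l.any (fun y => decide (x < y) && decide (y ≤ x + k)))

theorem pvSurv_iff (l : List Int) (k x : Int) :
    pvSurv l k x = true ↔ ∀ y ∈ l, ¬(x < y ∧ y ≤ x + k) := by
  simp [pvSurv]

-- survival only depends on the multiset of bacteria
theorem pvSurv_perm (l₁ l₂ : List Int) (k x : Int) (h : l₁.Perm l₂) :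
    pvSurv l₁ k x = pvSurv l₂ k x := by
  unfold pvSurv
  apply congrArg
  apply Bool.eq_iff_iff.mpr
  simp [List.any_eq_true, h.mem_iff]

-- on a descending-sorted l = pre ++ size :: rest, everything before the cursor is ≥ size
theorem pvSorted_facts (l pre rest : List Int) (size : Int)
    (hl : l = pre ++ size :: rest)
    (hs : l.Pairwise (fun a b => b ≤ a)) :
    (∀ z ∈ pre, size ≤ z) ∧ (∀ z ∈ rest, z ≤ size) := by
  subst hl
  obtain ⟨_, h2, h3⟩ := List.pairwise_append.mp hs
  exact ⟨fun z hz => h3 z hz size List.mem_cons_self,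
         (List.pairwise_cons.mp h2).1⟩

-- countP of the singleton chain head
theorem pvCountHead (l : List Int) (k size : Int) (flag : Bool)
    (hflag : pvSurv l k size = !flag) :
    ([size] : List Int).countP (pvSurv l k) = (if flag then 0 else 1) := by
  rw [List.countP_cons, List.countP_nil, hflag]
  cases flag <;> rfl

-- inner-loop characterisation: the swallowed block 'size :: eaten' contains exactly one
-- survivor when the chain head survives (none when the running size is already dead),
-- and the element the chain stops at survives.
theorem pvInnerA_spec (k : Int) (l : List Int) (hs : l.Pairwise (fun a b => b ≤ a))
    (rest : List Int) : ∀ (pre : List Int) (size : Int) (flag : Bool),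
    l = pre ++ size :: rest →
    pvSurv l k size = !flag →
    ∃ eaten, rest = eaten ++ pvInnerA k size flag rest
      ∧ (size :: eaten).countP (pvSurv l k) = (if flag then 0 else 1)
      ∧ (∀ y r', pvInnerA k size flag rest = y :: r' → pvSurv l k y = true) := by
  induction rest with
  | nil =>
    intro pre size flag hl hflag
    exact ⟨[], by simp [pvInnerA], pvCountHead l k size flag hflag,
           fun y r' h => by simp [pvInnerA] at h⟩
  | cons x rest' ih =>
    intro pre size flag hl hflag
    obtain ⟨hpre, hrest⟩ := pvSorted_facts l pre (x :: rest') size hl hs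
    have hxle : x ≤ size := hrest x List.mem_cons_self
    have hsizemem : size ∈ l := by rw [hl]; simp
    have hs' := hs
    rw [hl] at hs'
    have htail : ∀ z ∈ rest', z ≤ x :=
      (List.pairwise_cons.mp (List.pairwise_cons.mp (List.pairwise_append.mp hs').2.1).2).1
    rw [pvInnerA]
    by_cases h2 : size - x > k
    · rw [if_pos h2]
      refine ⟨[], by simp, pvCountHead l k size flag hflag, fun y r' h => ?_⟩
      injection h with h1 _
      subst h1
      rw [pvSurv_iff]
      rintro z hz ⟨hlt, hle⟩
      rw [hl] at hz
      rcases List.mem_append.mp hz with hz1 | hz2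
      · have := hpre z hz1; omega
      · rcases List.mem_cons.mp hz2 with rfl | hz3
        · omega
        · rcases List.mem_cons.mp hz3 with rfl | hz4
          · omega
          · have := htail z hz4; omega
    · rw [if_neg h2]
      by_cases h3 : size - x = 0 ∧ flag = false
      · rw [if_pos h3]
        refine ⟨[], by simp, pvCountHead l k size flag hflag, fun y r' h => ?_⟩
        injection h with h1 _
        subst h1
        have hyx : x = size := by omega
        rw [hyx, hflag, h3.2]
        rfl
      · rw [if_neg h3]
        -- swallow step: the new running size x is dead
        have hdead : pvSurv l k x = false := by
          by_cases hd0 : size - x = 0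
          · have hf : flag = true := by
              cases flag
              · exact absurd ⟨hd0, rfl⟩ h3
              · rfl
            have hxs : x = size := by omega
            rw [hxs, hflag, hf]; rfl
          · have : ¬ pvSurv l k x = true := by
              rw [pvSurv_iff]
              push Not
              exact ⟨size, hsizemem, by omega, by omega⟩
            exact Bool.not_eq_true _ |>.mp this
        obtain ⟨eaten', he, hc, hnext⟩ :=
          ih (pre ++ [size]) x true (by rw [hl]; simp) (by rw [hdead]; rfl)
        refine ⟨x :: eaten', by simpa using he, ?_, hnext⟩
        have hc' : (x :: eaten').countP (pvSurv l k) = 0 := by simpa using hc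
        rw [List.countP_cons, hc', hflag]
        cases flag <;> simp
  -- (the recursion is structural in rest)

-- outer-loop characterisation: starting at a surviving chain head, the result counts
-- exactly the survivors of the remaining suffix
theorem pvOuterA_spec (k : Int) (l : List Int) (hs : l.Pairwise (fun a b => b ≤ a))
    (rest : List Int) (pre : List Int) (result : Int)
    (hl : l = pre ++ rest)
    (hhead : ∀ y r', rest = y :: r' → pvSurv l k y = true) :
    pvOuterA k result rest = result + ((rest.countP (pvSurv l k) : Nat) : Int) := by
  match rest with
  | [] => simp [pvOuterA]
  | x :: rest' =>
    obtain ⟨eaten, he, hc, hnext⟩ :=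
      pvInnerA_spec k l hs rest' pre x false (by simpa using hl)
        (by rw [hhead x rest' rfl]; rfl)
    rw [pvOuterA]
    have hl2 : l = (pre ++ x :: eaten) ++ pvInnerA k x false rest' := by
      rw [hl, List.append_assoc, List.cons_append]
      exact congrArg (fun t => pre ++ x :: t) he
    rw [pvOuterA_spec k l hs (pvInnerA k x false rest') (pre ++ x :: eaten) (result + 1)
        hl2 hnext]
    have hsplit : (x :: rest').countP (pvSurv l k)
        = (x :: eaten).countP (pvSurv l k) + (pvInnerA k x false rest').countP (pvSurv l k) := by
      conv_lhs => rw [he]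
      rw [List.countP_cons, List.countP_cons, List.countP_append]
      omega
    rw [hsplit, hc]
    push_cast
    ring
termination_by rest.length
decreasing_by exact Nat.lt_succ_of_le (pvInnerA_len_le k x false rest')

theorem micro_world_spec : Claim_equal_micro_world := by
  intro bacteria k _
  unfold Spec_micro_world micro_world micro_world_alt
  have hperm : (PySem.List.sorted bacteria (fun x => x) true).Perm bacteria :=
    PySem.List.sorted_perm bacteria (fun x => x) true
  have hpair : (PySem.List.sorted bacteria (fun x => x) true).Pairwise (fun a b => b ≤ a) := by
    have := PySem.List.sorted_pairwise_rev (xs := bacteria) (key := fun x => x)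
    simpa using this
  set L := PySem.List.sorted bacteria (fun x => x) true with hL
  have hhead : ∀ y r', L = y :: r' → pvSurv L k y = true := by
    intro y r' h
    rw [pvSurv_iff]
    rintro z hz ⟨hlt, _⟩
    rw [h] at hz hpair
    rcases List.mem_cons.mp hz with rfl | hz2
    · omega
    · have := (List.pairwise_cons.mp hpair).1 z hz2
      omega
  rw [pvOuterA_spec k L hpair L [] 0 (by simp) hhead]
  have hsw : L.countP (pvSurv L k) = L.countP (pvSurv bacteria k) :=
    List.countP_congr (fun x _ => by rw [pvSurv_perm L bacteria k x hperm])
  rw [hsw, hperm.countP_eq]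
  rw [Int.zero_add]
  rfl
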